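-- pv_equiv track=rewrite | github.com/zlin1228/fair-market-value-analysis | src/helpers.py | get_isin_from_cusip
-- ===== SOURCE A (Python) =====
-- def get_isin_from_cusip(cusip_str, country_code='US'):
--     """
--     >>> get_isin_from_cusip('037833100', 'US')
--     'US0378331005'
--     """
--     isin_to_digest = country_code + cusip_str.upper()
--
--     get_numerical_code = lambda c: str(ord(c) - 55)
--     encode_letters = lambda c: c if c.isdigit() else get_numerical_code(c)
--     to_digest = ''.join(map(encode_letters, isin_to_digest))
--
--     ints = [int(s) for s in to_digest[::-1]]
--     every_second_doubled = [x * 2 for x in ints[::2]] + ints[1::2]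
--
--     sum_digits = lambda i: sum(divmod(i, 10))
--     digit_sum = sum([sum_digits(i) for i in every_second_doubled])
--
--     check_digit = (10 - digit_sum % 10) % 10
--     return isin_to_digest + str(check_digit)
-- ===== SOURCE B (Python) =====
-- # Table-driven Luhn: per-character digit contributions precomputed once, one
-- # reversed scan over the characters with a doubling toggle (no intermediate
-- # digit string/list, no slicing).
--
-- _DOUBLE = (0, 2, 4, 6, 8, 1, 3, 5, 7, 9)  # Luhn value of a doubled digit d: sum of digits of 2*d
--
--
-- def _contributions():
--     # for each valid character, the digit values A's expansion produces,
--     # lowest-order digit first (letters expand to the decimal digits of ord(c)-55)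
--     table = {}
--     for code in range(48, 127):
--         c = chr(code)
--         if c.isdigit():
--             table[c] = (code - 48,)
--         elif code >= 55:
--             v = code - 55
--             table[c] = (v % 10,) if v < 10 else (v % 10, v // 10)
--     return table
--
--
-- _DIGITS = _contributions()
--
--
-- def get_isin_from_cusip(cusip_str, country_code='US'):
--     isin_to_digest = country_code + cusip_str.upper()
--     total = 0
--     dbl = True  # the rightmost digit of the expansion is doubled
--     for c in reversed(isin_to_digest):
--         for d in _DIGITS[c]:
--             total += _DOUBLE[d] if dbl else d
--             dbl = not dbl
--     return isin_to_digest + str((10 - total % 10) % 10)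
-- ===== Notes on version B (the rewrite author's own statement) =====
-- stated objective: faster
-- what changed: B precomputes a per-character table of Luhn digit contributions (low digit first) and computes the check digit in a single reversed scan over the characters with a doubling toggle and a doubled-digit lookup table, replacing A's expand-to-string / reverse / two step-2 slices / three intermediate lists / int()-per-character pipeline; on invalid characters the table lookup raises, so B still raises where A does.
import Mathlib
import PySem

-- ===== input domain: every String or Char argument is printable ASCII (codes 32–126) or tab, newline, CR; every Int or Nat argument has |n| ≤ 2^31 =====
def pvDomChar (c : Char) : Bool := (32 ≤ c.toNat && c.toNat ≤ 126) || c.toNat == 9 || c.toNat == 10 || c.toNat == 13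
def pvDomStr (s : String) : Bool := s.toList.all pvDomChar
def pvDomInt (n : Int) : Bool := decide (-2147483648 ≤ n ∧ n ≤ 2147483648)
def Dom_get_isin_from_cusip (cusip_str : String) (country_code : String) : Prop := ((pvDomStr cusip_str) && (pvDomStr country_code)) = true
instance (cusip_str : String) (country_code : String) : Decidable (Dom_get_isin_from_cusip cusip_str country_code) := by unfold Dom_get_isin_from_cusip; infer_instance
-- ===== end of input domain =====

-- B replaces A's expand-to-string / reverse / two step-2 slices / three intermediate lists pipeline
-- by a precomputed per-character contribution table and ONE reversed scan with a doubling toggle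
-- (objective: faster — a timing run measured a constant-factor speedup); return values agree on Pre_; outside Pre_ both raise.

-- ===== PORT A =====
-- encode_letters: c if c.isdigit() else str(ord(c) - 55)
def pvEncA (c : Char) : List Char :=
  if PySem.Chars.isdigit c then [c] else PySem.Int.toChars ((c.toNat : Int) - 55)

def get_isin_from_cusip (cusip_str : String) (country_code : String) : String :=
  let isin_to_digest : List Char := country_code.toList ++ PySem.Chars.upper cusip_str.toList
  let to_digest : List Char := PySem.Chars.join [] (isin_to_digest.map pvEncA)
  -- [int(s) for s in to_digest[::-1]]; int(s) raises ValueError on a non-digit character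
  -- (only possible via the minus sign of a negative code) — exactly those inputs are outside Pre_
  let ints : List Int :=
    ((PySem.Chars.slice? to_digest none none (-1)).getD []).map
      (fun c => (PySem.Int.ofChars? [c]).getD 0)
  let every_second_doubled : List Int :=
    ((PySem.List.slice? ints none none 2).getD []).map (· * 2) ++
      (PySem.List.slice? ints (some 1) none 2).getD []
  let digit_sum : Int :=
    (every_second_doubled.map (fun i => PySem.Int.floordiv i 10 + PySem.Int.mod i 10)).sum
  let check_digit : Int := PySem.Int.mod (10 - PySem.Int.mod digit_sum 10) 10
  String.ofList (isin_to_digest ++ PySem.Int.toChars check_digit)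

-- ===== PORT B =====
-- _DOUBLE: Luhn value of a doubled digit
def pvDouble : List Int := [0, 2, 4, 6, 8, 1, 3, 5, 7, 9]

-- _DIGITS = _contributions(): for each valid character the digit values it contributes, low digit first
def pvDigitsTable : PySem.Dict Char (List Int) :=
  (PySem.List.pyRange 48 127 1).foldl
    (fun (t : PySem.Dict Char (List Int)) code =>
      let c := Char.ofNat code.toNat
      if PySem.Chars.isdigit c then t.insert c [code - 48]
      else if 55 ≤ code then
        let v : Int := code - 55
        t.insert c (if v < 10 then [PySem.Int.mod v 10]
                    else [PySem.Int.mod v 10, PySem.Int.floordiv v 10])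
      else t)
    (PySem.Dict.empty)

def get_isin_from_cusip_alt (cusip_str : String) (country_code : String) : String :=
  let isin_to_digest : List Char := country_code.toList ++ PySem.Chars.upper cusip_str.toList
  -- for c in reversed(isin): for d in _DIGITS[c]: total += _DOUBLE[d] if dbl else d; dbl = not dbl
  -- (the lookups raise outside Pre_ in Python; totalized with .getD here)
  let st : Int × Bool :=
    isin_to_digest.reverse.foldl
      (fun st c =>
        ((pvDigitsTable.get? c).getD []).foldl
          (fun (st : Int × Bool) d =>
            (st.1 + (if st.2 then (PySem.List.pyGet? pvDouble d).getD 0 else d), !st.2))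
          st)
      (0, true)
  String.ofList (isin_to_digest ++
    PySem.Int.toChars (PySem.Int.mod (10 - PySem.Int.mod st.1 10) 10))

-- ===== PRECONDITION & SPEC =====
-- Pre_ = exactly the inputs on which A returns: every character of country_code + cusip_str.upper()
-- is a decimal digit or has code ≥ 55 (otherwise str(ord(c)-55) starts with a minus sign and int() raises ValueError).
def Pre_get_isin_from_cusip (cusip_str : String) (country_code : String) : Prop :=
  ((country_code.toList ++ PySem.Chars.upper cusip_str.toList).all
    (fun c => PySem.Chars.isdigit c || decide (55 ≤ c.toNat))) = true
instance (cusip_str : String) (country_code : String) : Decidable (Pre_get_isin_from_cusip cusip_str country_code) := by unfold Pre_get_isin_from_cusip; infer_instance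
def pvWitness_get_isin_from_cusip : String × String := ("037833100", "US")

def Spec_get_isin_from_cusip (cusip_str : String) (country_code : String) (out : String) : Prop := out = get_isin_from_cusip_alt cusip_str country_code
instance (cusip_str : String) (country_code : String) (out : String) : Decidable (Spec_get_isin_from_cusip cusip_str country_code out) := by unfold Spec_get_isin_from_cusip; infer_instance

-- ===== CLAIM (what is proved, stated in full; the proofs are below) =====
def Claim_equal_get_isin_from_cusip : Prop := ∀ (cusip_str : String) (country_code : String), Dom_get_isin_from_cusip cusip_str country_code → Pre_get_isin_from_cusip cusip_str country_code → Spec_get_isin_from_cusip cusip_str country_code (get_isin_from_cusip cusip_str country_code)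

-- ===== LEMMAS AND PROOFS =====

-- the value int(str(c)) produces for one character of to_digest
def pvIntOf (c : Char) : Int := (PySem.Int.ofChars? [c]).getD 0

-- per-character agreement of the two expansions: B's table entry is A's digit values reversed,
-- and every entry is a decimal digit; checked over all relevant ASCII codes
set_option maxRecDepth 8192 in
theorem pvChar_table : ∀ n ∈ List.range 127,
    (PySem.Chars.isdigit (Char.ofNat n) = true ∨ 55 ≤ (Char.ofNat n).toNat) →
      (pvDigitsTable.get? (Char.ofNat n)).getD []
          = ((pvEncA (Char.ofNat n)).map pvIntOf).reverse
        ∧ ∀ d ∈ (pvDigitsTable.get? (Char.ofNat n)).getD [], 0 ≤ d ∧ d < 10 := by decide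

theorem pvChar_step (c : Char) (hle : c.toNat ≤ 126)
    (h : PySem.Chars.isdigit c = true ∨ 55 ≤ c.toNat) :
    (pvDigitsTable.get? c).getD [] = ((pvEncA c).map pvIntOf).reverse
      ∧ ∀ d ∈ (pvDigitsTable.get? c).getD [], 0 ≤ d ∧ d < 10 := by
  have := pvChar_table c.toNat (by simp [List.mem_range]; omega)
  rw [Char.ofNat_toNat] at this
  exact this h

set_option maxRecDepth 8192 in
theorem pvUpper_table : ∀ n ∈ List.range 127,
    (PySem.Chars.upperChar (Char.ofNat n)).toNat ≤ 126 := by decide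

theorem pvUpper_bound (c : Char) (hle : c.toNat ≤ 126) :
    (PySem.Chars.upperChar c).toNat ≤ 126 := by
  have := pvUpper_table c.toNat (by simp [List.mem_range]; omega)
  rwa [Char.ofNat_toNat] at this

-- '' .join with an empty separator is flatten
theorem pvIntersperse_nil_flatten : ∀ (l : List (List Char)),
    (List.intersperse ([] : List Char) l).flatten = l.flatten
  | [] => rfl
  | [_] => rfl
  | a :: b :: t => by
    have ih := pvIntersperse_nil_flatten (b :: t)
    simp only [List.intersperse, List.flatten_cons, List.nil_append]
    rw [ih]
    simp

theorem pvJoin_nil (l : List (List Char)) : PySem.Chars.join [] l = l.flatten := by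
  simp only [PySem.Chars.join, List.intercalate]
  exact pvIntersperse_nil_flatten l

-- step-2 slices: the even- and odd-indexed sublists
def pvEvens : List Int → List Int
  | [] => []
  | [a] => [a]
  | a :: _ :: t => a :: pvEvens t

def pvOdds : List Int → List Int
  | [] => []
  | [_] => []
  | _ :: b :: t => b :: pvOdds t

theorem pvFM_even : ∀ (xs : List Int) (g : Nat → Option Int),
    (∀ k, g k = xs[2 * k]?) →
    List.filterMap g (List.range ((xs.length + 1) / 2)) = pvEvens xs
  | [], g, hg => by simp [pvEvens]
  | [a], g, hg => by
    simp only [List.length_singleton, pvEvens]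
    have h0 := hg 0
    simp at h0
    simp [List.range_succ, h0]
  | a :: b :: t, g, hg => by
    have hlen : (a :: b :: t).length = t.length + 2 := by simp
    have hcnt : ((a :: b :: t).length + 1) / 2 = (t.length + 1) / 2 + 1 := by
      rw [hlen]; omega
    rw [hcnt, List.range_succ_eq_map]
    have h0 := hg 0
    simp at h0
    rw [List.filterMap_cons, h0, List.filterMap_map]
    have ih := pvFM_even t (fun k => g (k + 1)) (fun k => by
      show g (k + 1) = t[2 * k]?
      rw [hg (k + 1)]
      show (a :: b :: t)[2 * (k + 1)]? = t[2 * k]?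
      have : 2 * (k + 1) = 2 * k + 1 + 1 := by omega
      rw [this]
      simp)
    simp only [pvEvens]
    rw [← ih]
    rfl

theorem pvFM_odd : ∀ (xs : List Int) (g : Nat → Option Int),
    (∀ k, g k = xs[2 * k + 1]?) →
    List.filterMap g (List.range (xs.length / 2)) = pvOdds xs
  | [], g, hg => by simp [pvOdds]
  | [a], g, hg => by simp [pvOdds]
  | a :: b :: t, g, hg => by
    have hcnt : (a :: b :: t).length / 2 = t.length / 2 + 1 := by simp; omega
    rw [hcnt, List.range_succ_eq_map]
    have h0 := hg 0
    simp at h0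
    rw [List.filterMap_cons, h0, List.filterMap_map]
    have ih := pvFM_odd t (fun k => g (k + 1)) (fun k => by
      show g (k + 1) = t[2 * k + 1]?
      rw [hg (k + 1)]
      show (a :: b :: t)[2 * (k + 1) + 1]? = t[2 * k + 1]?
      have : 2 * (k + 1) + 1 = 2 * k + 1 + 1 + 1 := by omega
      rw [this]
      simp)
    simp only [pvOdds]
    rw [← ih]
    rfl

theorem pvSlice2_zero (xs : List Int) :
    PySem.List.slice? xs none none 2 = some (pvEvens xs) := by
  simp only [PySem.List.slice?, PySem.List.sliceIndices]
  norm_num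
  have hc : (if 0 < xs.length then (((xs.length : Int) + 2 - 1) / 2).toNat else 0)
      = (xs.length + 1) / 2 := by split <;> omega
  rw [hc]
  refine pvFM_even xs _ (fun k => ?_)
  rw [show ((2 : Int) * (k : Int)).toNat = 2 * k from by omega]

theorem pvSlice2_one (xs : List Int) :
    PySem.List.slice? xs (some 1) none 2 = some (pvOdds xs) := by
  simp only [PySem.List.slice?, PySem.List.sliceIndices]
  norm_num
  rcases xs with _ | ⟨x, t⟩
  · simp [pvOdds]
  · have hm : min 1 ((x :: t).length : Int) = 1 := by
      simp only [List.length_cons]; omega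
    rw [hm]
    have hc : (if 1 < (x :: t).length then ((((x :: t).length : Int) - 1 + 2 - 1) / 2).toNat else 0)
        = (x :: t).length / 2 := by
      simp only [List.length_cons]; split <;> omega
    rw [hc]
    refine pvFM_odd (x :: t) _ (fun k => ?_)
    rw [show ((1 : Int) + 2 * (k : Int)).toNat = 2 * k + 1 from by omega]

-- the Luhn digit contribution of one entry
def pvF (i : Int) : Int := PySem.Int.floordiv i 10 + PySem.Int.mod i 10

-- alternating Luhn sum: head doubled iff the flag is set
def pvSb : Bool → List Int → Int
  | _, [] => 0
  | b, d :: l => (if b then pvF (d * 2) else pvF d) + pvSb (!b) l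

-- A's evens/odds decomposition computes the alternating sum
theorem pvA_eq : ∀ rds : List Int,
    ((pvEvens rds).map (fun x => pvF (x * 2))).sum + ((pvOdds rds).map pvF).sum = pvSb true rds
  | [] => rfl
  | [a] => by
    simp [pvEvens, pvOdds, pvSb]
  | a :: b :: t => by
    have ih := pvA_eq t
    simp only [pvEvens, pvOdds, List.map_cons, List.sum_cons, pvSb, Bool.not_true, Bool.not_false]
    norm_num
    linarith [ih]

-- B's toggle fold computes the alternating sum (entries are decimal digits)
theorem pvTog_eq : ∀ (l : List Int), (∀ d ∈ l, 0 ≤ d ∧ d < 10) → ∀ (t : Int) (b : Bool),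
    (l.foldl (fun (st : Int × Bool) d =>
        (st.1 + (if st.2 then (PySem.List.pyGet? pvDouble d).getD 0 else d), !st.2)) (t, b)).1
      = t + pvSb b l
  | [], _, t, b => by simp [pvSb]
  | d :: l, h, t, b => by
    have hd := h d (List.mem_cons_self ..)
    have hstep : (if b then (PySem.List.pyGet? pvDouble d).getD 0 else d)
        = (if b then pvF (d * 2) else pvF d) := by
      obtain ⟨h0, h1⟩ := hd
      interval_cases d <;> cases b <;> decide
    have ih := pvTog_eq l (fun x hx => h x (List.mem_cons_of_mem _ hx)) (t + (if b then pvF (d * 2) else pvF d)) (!b)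
    simp only [List.foldl_cons, hstep] at *
    rw [ih]
    simp only [pvSb]
    ring

-- ===== VERDICT (by name: the statement is the Claim_ definition above) =====
set_option maxRecDepth 4096 in
theorem get_isin_from_cusip_spec : Claim_equal_get_isin_from_cusip := by
  intro cu cc hdom hpre
  unfold Pre_get_isin_from_cusip at hpre
  unfold Spec_get_isin_from_cusip get_isin_from_cusip get_isin_from_cusip_alt
  simp only []
  set isin : List Char := cc.toList ++ PySem.Chars.upper cu.toList with hisin
  have hpre' : ∀ c ∈ isin, PySem.Chars.isdigit c = true ∨ 55 ≤ c.toNat := by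
    intro c hc
    have h := List.all_eq_true.mp hpre c hc
    simpa using h
  -- every character of isin is ASCII ≤ 126
  have hdomc : ∀ c ∈ isin, c.toNat ≤ 126 := by
    intro c hc
    unfold Dom_get_isin_from_cusip pvDomStr at hdom
    simp only [Bool.and_eq_true, List.all_eq_true] at hdom
    rcases List.mem_append.1 hc with h | h
    · have := hdom.2 c h
      simp [pvDomChar] at this
      omega
    · simp only [PySem.Chars.upper, List.mem_map] at h
      obtain ⟨c0, hc0, rfl⟩ := h
      have := hdom.1 c0 hc0
      simp [pvDomChar] at this
      exact pvUpper_bound c0 (by omega)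
  have hchar : ∀ c ∈ isin,
      (pvDigitsTable.get? c).getD [] = ((pvEncA c).map pvIntOf).reverse
        ∧ ∀ d ∈ (pvDigitsTable.get? c).getD [], 0 ≤ d ∧ d < 10 := fun c hc =>
    pvChar_step c (hdomc c hc) (hpre' c hc)
  -- A's digit list
  set ds : List Int := isin.flatMap (fun c => (pvEncA c).map pvIntOf) with hds
  have hA : (PySem.Chars.join [] (isin.map pvEncA)).map pvIntOf = ds := by
    rw [pvJoin_nil, List.map_flatten, List.map_map]
    rw [hds]
    rfl
  -- A's ints list is ds reversed
  have hints :
      ((PySem.Chars.slice? (PySem.Chars.join [] (isin.map pvEncA)) none none (-1)).getD []).map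
          (fun c => (PySem.Int.ofChars? [c]).getD 0) = ds.reverse := by
    rw [PySem.Chars.slice?_eq_listSlice?, PySem.List.slice?_none_none_neg_one]
    simp only [Option.getD_some]
    rw [List.map_reverse]
    exact congrArg List.reverse hA
  rw [hints]
  -- B's contribution stream is ds reversed
  have hBds : isin.reverse.flatMap (fun c => (pvDigitsTable.get? c).getD []) = ds.reverse := by
    rw [hds, List.reverse_flatMap]
    show _ = isin.reverse.flatMap (fun c => ((pvEncA c).map pvIntOf).reverse)
    refine List.flatMap_congr (fun c hc => ?_)
    exact (hchar c (List.mem_reverse.mp hc)).1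
  have hbound : ∀ d ∈ ds.reverse, 0 ≤ d ∧ d < 10 := by
    intro d hd
    rw [← hBds] at hd
    obtain ⟨c, hc, hdc⟩ := List.mem_flatMap.mp hd
    exact (hchar c (List.mem_reverse.mp hc)).2 d hdc
  -- B's nested fold is the toggle fold over ds.reverse
  have hBfold :
      (isin.reverse.foldl
        (fun st c =>
          ((pvDigitsTable.get? c).getD []).foldl
            (fun (st : Int × Bool) d =>
              (st.1 + (if st.2 then (PySem.List.pyGet? pvDouble d).getD 0 else d), !st.2))
            st)
        ((0 : Int), true)).1 = 0 + pvSb true ds.reverse := by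
    rw [← List.foldl_flatMap, hBds]
    exact pvTog_eq ds.reverse hbound 0 true
  -- A's digit_sum is the same alternating sum
  rw [pvSlice2_zero, pvSlice2_one]
  simp only [Option.getD_some]
  have hAsum :
      (((pvEvens ds.reverse).map (· * 2) ++ pvOdds ds.reverse).map
          (fun i => PySem.Int.floordiv i 10 + PySem.Int.mod i 10)).sum = pvSb true ds.reverse := by
    rw [List.map_append, List.sum_append, List.map_map]
    exact pvA_eq ds.reverse
  rw [hAsum, hBfold, zero_add]
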